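-- pv_equiv track=rewrite | github.com/jiayiwangjw/pythonstudy | 4.5.09.word with same counts in a key .py | length_words
-- ===== SOURCE A (Python) =====
-- def length_words(sentence):
--
--     #The preparation for this problem is the same as the
--     #previous one: strip out punctuation, convert to lower
--     #case, split the string by spaces, and create a new
--     #dictionary to hold our results:
--
--     sentence = sentence.lower()
--
--     to_replace = ".,'!?"
--     for mark in to_replace:
--         sentence = sentence.replace(mark, "")
--
--     sentence = sentence.split(' ')
--     word_lengths = {}
--
--     #Then, as before, we iterate through each word in the
--     #sentence:
--
--     for word in sentence:
--
--         #However, instead of adding word as the key to the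
--         #dictionary, we want to add len(word) as the key.
--         #The values are going to be lists, which makes things
--         #more complicated: we want to be able to add things
--         #to an existing list when we encounter future words
--         #with the same length. That means we need to check
--         #if the key already exists in the dictionary.
--         #
--         #There are a few ways to do this, but here's my
--         #preferred way. First, check to see if len(word) is
--         #already in the dictionary:
--
--         if len(word) not in word_lengths.keys():
--
--             #If it's not, then add it, and set its value to
--             #an empty list:
--
--             word_lengths[len(word)] = []
--
--         #Now, we're guaranteed here that len(word) is a key
--         #because if it wasn't already one, we *just* added
--         #it. So, we can just go ahead and append to its list
--         #without worrying about a key error.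
--         #
--         #First, we get the list of words with the same length
--         #as the current word:
--
--         word_list = word_lengths[len(word)]
--
--         #Then, we add the current word to that list:
--
--         word_list.append(word)
--
--         #Remember, lists are mutable, so word_list is pointing
--         #to the same actual list as word_lengths[len(word)]. So,
--         #adding word to word_list also adds it to
--         #word_lengths[len(word)].
--
--
--     #Now we're done, so we can return our result!
--
--     return word_lengths
-- ===== SOURCE B (Python) =====
-- def length_words(sentence):
--     sentence = sentence.lower()
--     for mark in ".,'!?":
--         sentence = sentence.replace(mark, "")
--     words = sentence.split(' ')
--     lengths = list(dict.fromkeys(len(w) for w in words))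
--     return {n: [w for w in words if len(w) == n] for n in lengths}
-- ===== Notes on version B (the rewrite author's own statement) =====
-- stated objective: simpler
-- what changed: Replaces the incremental if-key-missing insert/append loop with a two-pass formulation: first the distinct word lengths in order of first occurrence (dict.fromkeys), then a dict comprehension that gathers each length's words with a filter.
import Mathlib
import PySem

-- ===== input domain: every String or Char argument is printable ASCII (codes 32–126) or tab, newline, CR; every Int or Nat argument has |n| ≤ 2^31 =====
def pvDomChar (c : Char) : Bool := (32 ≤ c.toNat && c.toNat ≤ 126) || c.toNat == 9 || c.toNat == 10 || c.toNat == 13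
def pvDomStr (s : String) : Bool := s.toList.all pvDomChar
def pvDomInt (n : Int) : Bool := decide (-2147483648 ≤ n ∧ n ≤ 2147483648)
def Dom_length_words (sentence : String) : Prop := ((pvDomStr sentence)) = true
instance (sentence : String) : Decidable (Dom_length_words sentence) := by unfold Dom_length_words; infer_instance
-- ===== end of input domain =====

-- B replaces A's incremental if-key-missing insert/append loop by a two-pass formulation
-- (first-occurrence-ordered distinct lengths, then one filter per length); objective: simpler.

-- ===== PORT A =====
-- shared preprocessing of A and B (both Pythons run the identical three lines):
-- lower, strip each of ".,'!?" via replace, split(' ')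
def pvPrep (sentence : String) : List String :=
  let s := PySem.Str.lower sentence
  let s := (".,'!?").toList.foldl (fun s c => PySem.Str.replace s (String.ofList [c]) "") s
  (PySem.Str.split? s " ").getD []   -- sep is the nonempty literal " ", so split? is never none

def length_words (sentence : String) : List (Int × List String) :=
  let words := pvPrep sentence
  let d := words.foldl (fun d w =>
      let k : Int := PySem.Str.len w
      let d := if d.contains k then d else d.insert k ([] : List String)
      d.modify k [] (fun l => l ++ [w]))
    (PySem.Dict.empty : PySem.Dict Int (List String))
  d.items

-- ===== PORT B =====
def length_words_alt (sentence : String) : List (Int × List String) :=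
  let words := pvPrep sentence
  let lengths := PySem.List.dedup (words.map (fun w => PySem.Str.len w))
  lengths.map (fun n => (n, words.filter (fun w => PySem.Str.len w == n)))

-- ===== PRECONDITION & SPEC =====
def Spec_length_words (sentence : String) (out : List (Int × List String)) : Prop := out = length_words_alt sentence
instance (sentence : String) (out : List (Int × List String)) : Decidable (Spec_length_words sentence out) := by unfold Spec_length_words; infer_instance

-- ===== CLAIM (what is proved, stated in full; the proofs are below) =====
def Claim_equal_length_words : Prop := ∀ (sentence : String), Dom_length_words sentence → Spec_length_words sentence (length_words sentence)

-- ===== LEMMAS AND PROOFS =====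

-- A's loop body (guarded insert of [] then append) is exactly Dict.modify with default []
theorem pv_step_eq (d : PySem.Dict Int (List String)) (w : String) :
    (let k : Int := PySem.Str.len w
     let d := if d.contains k then d else d.insert k ([] : List String)
     d.modify k [] (fun l => l ++ [w]))
    = d.modify (PySem.Str.len w) [] (fun l => l ++ [w]) := by
  show (if d.contains (PySem.Str.len w) then d else d.insert (PySem.Str.len w) []).modify
      (PySem.Str.len w) [] (fun l => l ++ [w]) = _
  by_cases h : d.contains (PySem.Str.len w)
  · rw [if_pos h]
  · rw [if_neg h]
    rw [PySem.Dict.modify, PySem.Dict.modify, PySem.Dict.getD_insert_self,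
      PySem.Dict.insert_insert_self,
      PySem.Dict.getD_of_not_contains d [] (by simpa using h)]

-- the whole of A's fold, characterised as B's two-pass expression
theorem pv_fold_eq (ws : List String) :
    (ws.foldl (fun d w =>
        let k : Int := PySem.Str.len w
        let d := if d.contains k then d else d.insert k ([] : List String)
        d.modify k [] (fun l => l ++ [w]))
      (PySem.Dict.empty : PySem.Dict Int (List String))).items
    = (PySem.List.dedup (ws.map (fun w => PySem.Str.len w))).map
        (fun n => (n, ws.filter (fun w => PySem.Str.len w == n))) := by
  have hstep : (fun (d : PySem.Dict Int (List String)) (w : String) =>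
      let k : Int := PySem.Str.len w
      let d := if d.contains k then d else d.insert k ([] : List String)
      d.modify k [] (fun l => l ++ [w]))
      = fun d w => d.modify (PySem.Str.len w) [] (fun l => l ++ [w]) := by
    funext d w; exact pv_step_eq d w
  rw [hstep]
  set D := ws.foldl (fun d w => d.modify (PySem.Str.len w) [] (fun l => l ++ [w]))
    (PySem.Dict.empty : PySem.Dict Int (List String)) with hD
  have hkeys : D.keys = PySem.List.dedup (ws.map (fun w => PySem.Str.len w)) := by
    rw [hD, PySem.Dict.keys_foldl_modify_key ws (fun w => PySem.Str.len w) []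
      (fun _ w => (fun l => l ++ [w]))]
    simp [PySem.List.dedup, PySem.Set.ofList, PySem.Set.update, PySem.Dict.keys_empty]
  have hnodup : D.keys.Nodup := by
    rw [hD]
    exact PySem.Dict.nodup_keys_foldl_modify_key ws (fun w => PySem.Str.len w) []
      (fun _ w => (fun l => l ++ [w])) _ (by simp [PySem.Dict.keys_empty])
  have hgetD : ∀ c : Int, D.getD c [] = ws.filter (fun w => PySem.Str.len w == c) := by
    intro c
    have hmap : D = (ws.map (fun w => (PySem.Str.len w, w))).foldl
        (fun d p => d.modify p.1 [] (fun l => l ++ [p.2]))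
        (PySem.Dict.empty : PySem.Dict Int (List String)) := by
      rw [hD, List.foldl_map]
    rw [hmap, PySem.Dict.getD_foldl_modify_append]
    simp [List.filter_map, Function.comp_def]
  rw [PySem.Dict.items_eq_map_keys D hnodup ([] : List String), hkeys]
  exact List.map_congr_left (fun n _ => by rw [hgetD n])

-- ===== VERDICT (by name: the statement is the Claim_ definition above) =====
theorem length_words_spec : Claim_equal_length_words := by
  intro sentence _
  show length_words sentence = length_words_alt sentence
  unfold length_words length_words_alt
  exact pv_fold_eq (pvPrep sentence)
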